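-- pv_equiv track=rewrite | github.com/etabella30-sketch/eTabellaBackendNew | assets/pythons/annot-transfer/run3-backup.py | flatten_transcript
-- ===== SOURCE A (Python) =====
-- def flatten_transcript(transcript):
--     """Flatten transcript lines into a single text and positional mapping"""
--     word_list, position_list, char_spans = [], [], []
--     char_index = 0
--
--     for line_index, entry in enumerate(transcript):
--         words = entry['text'].split()
--         for word_index, word in enumerate(words):
--             word_list.append(word)
--             position_list.append((line_index, word_index))
--             start = char_index
--             end = start + len(word)
--             char_spans.append((start, end))
--             char_index = end + 1  # +1 for space
--
--     return " ".join(word_list), word_list, position_list, char_spans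
-- ===== SOURCE B (Python) =====
-- def flatten_transcript(transcript):
--     """Flatten transcript lines into a single text and positional mapping"""
--     words_per_line = [entry['text'].split() for entry in transcript]
--     word_list = [w for ws in words_per_line for w in ws]
--     position_list = [(li, wi) for li, ws in enumerate(words_per_line) for wi in range(len(ws))]
--     text = " ".join(word_list)
--     # derive the char spans by re-parsing the joined text: maximal runs of
--     # non-space characters (words never contain whitespace, so runs == words)
--     char_spans = []
--     start = None
--     for i, ch in enumerate(text):
--         if ch == " ":
--             if start is not None:
--                 char_spans.append((start, i))
--                 start = None
--         elif start is None:
--             start = i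
--     if start is not None:
--         char_spans.append((start, len(text)))
--     return text, word_list, position_list, char_spans
-- ===== Notes on version B (the rewrite author's own statement) =====
-- stated objective: alternative
-- what changed: A threads a running char_index through its word loop to build the spans; B never tracks a cursor: it builds the word lists per line, joins them into the text, and then recovers char_spans by re-parsing the joined text as maximal runs of non-space characters (words from split() contain no whitespace, so runs coincide with words).
import Mathlib
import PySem

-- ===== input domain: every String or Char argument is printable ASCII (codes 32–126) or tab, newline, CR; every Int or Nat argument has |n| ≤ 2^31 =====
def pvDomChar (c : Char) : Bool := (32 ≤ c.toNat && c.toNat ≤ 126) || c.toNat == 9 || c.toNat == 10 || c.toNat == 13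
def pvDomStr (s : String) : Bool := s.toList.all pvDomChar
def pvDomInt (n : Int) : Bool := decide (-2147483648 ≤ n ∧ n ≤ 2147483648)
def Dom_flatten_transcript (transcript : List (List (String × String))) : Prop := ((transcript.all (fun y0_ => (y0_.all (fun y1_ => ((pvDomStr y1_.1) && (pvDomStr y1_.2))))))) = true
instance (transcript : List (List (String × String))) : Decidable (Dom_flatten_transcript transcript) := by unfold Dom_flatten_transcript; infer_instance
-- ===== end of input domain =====

-- B drops A's running char cursor entirely: it joins the words into the text first and then
-- recovers char_spans by re-parsing the joined text as maximal runs of non-space characters;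
-- objective: alternative algorithm for the spans (same cost).

-- shared accessor: entry['text'].split()  (the same expression in both Pythons)
def lineWords (entry : List (String × String)) : List String :=
  PySem.Str.split₀ (((PySem.Dict.mk entry).get? "text").getD "")

-- ===== PORT A =====
-- A's loop state is (word_list, position_list, char_spans, char_index)
def aInner (li : Int) (st : List String × List (Int × Int) × List (Int × Int) × Int)
    (wi : Int × String) : List String × List (Int × Int) × List (Int × Int) × Int :=
  (st.1 ++ [wi.2], st.2.1 ++ [(li, wi.1)],
   st.2.2.1 ++ [(st.2.2.2, st.2.2.2 + PySem.Str.len wi.2)],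
   st.2.2.2 + PySem.Str.len wi.2 + 1)

def aOuter (st : List String × List (Int × Int) × List (Int × Int) × Int)
    (le : Int × List (String × String)) : List String × List (Int × Int) × List (Int × Int) × Int :=
  (PySem.List.enumerate (lineWords le.2) 0).foldl (aInner le.1) st

def flatten_transcript (transcript : List (List (String × String))) : String × List String × (List (Int × Int)) × (List (Int × Int)) :=
  let st := (PySem.List.enumerate transcript 0).foldl aOuter ([], [], [], 0)
  (PySem.Str.join " " st.1, st.1, st.2.1, st.2.2.1)

-- ===== PORT B =====
-- the span-scan loop body: state (char_spans, start)
def bStep (st : List (Int × Int) × Option Int) (ic : Int × Char) : List (Int × Int) × Option Int :=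
  if ic.2 = ' ' then
    match st.2 with
    | some s => (st.1 ++ [(s, ic.1)], none)
    | none => st
  else
    match st.2 with
    | some _ => st
    | none => (st.1, some ic.1)

def flatten_transcript_alt (transcript : List (List (String × String))) : String × List String × (List (Int × Int)) × (List (Int × Int)) :=
  let wordsPerLine := transcript.map lineWords
  let word_list := wordsPerLine.flatMap (fun ws => ws)
  let position_list := (PySem.List.enumerate wordsPerLine 0).flatMap
    (fun le => (PySem.List.pyRange 0 (PySem.List.len le.2) 1).map (fun wi => (le.1, wi)))
  let text := PySem.Str.join " " word_list
  let st := (PySem.List.enumerate text.toList 0).foldl bStep ([], none)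
  let char_spans := match st.2 with
    | none => st.1
    | some s => st.1 ++ [(s, PySem.Str.len text)]
  (text, word_list, position_list, char_spans)

-- ===== PRECONDITION & SPEC =====
-- Pre_ excludes exactly the inputs where Python raises KeyError: an entry without a 'text' key
-- (both A and B raise there).
def Pre_flatten_transcript (transcript : List (List (String × String))) : Prop :=
  ∀ e ∈ transcript, ((PySem.Dict.mk e).get? "text").isSome = true
instance (transcript : List (List (String × String))) : Decidable (Pre_flatten_transcript transcript) := by unfold Pre_flatten_transcript; infer_instance

def pvWitness_flatten_transcript : (List (List (String × String))) :=
  [[("text", "hello brave world")], [("text", " a  bc ")], [("text", "")]]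

def Spec_flatten_transcript (transcript : List (List (String × String))) (out : String × List String × (List (Int × Int)) × (List (Int × Int))) : Prop := out = flatten_transcript_alt transcript
instance (transcript : List (List (String × String))) (out : String × List String × (List (Int × Int)) × (List (Int × Int))) : Decidable (Spec_flatten_transcript transcript out) := by unfold Spec_flatten_transcript; infer_instance

-- ===== CLAIM (what is proved, stated in full; the proofs are below) =====
def Claim_equal_flatten_transcript : Prop := ∀ (transcript : List (List (String × String))), Dom_flatten_transcript transcript → Pre_flatten_transcript transcript → Spec_flatten_transcript transcript (flatten_transcript transcript)

-- ===== LEMMAS AND PROOFS =====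

-- spans produced by A's running cursor starting at c
def spansFrom (c : Int) : List String → List (Int × Int)
  | [] => []
  | w :: ws => (c, c + PySem.Str.len w) :: spansFrom (c + PySem.Str.len w + 1) ws

def costOf (ws : List String) : Int := (ws.map (fun w => PySem.Str.len w + 1)).sum

theorem costOf_cons (w : String) (ws : List String) :
    costOf (w :: ws) = PySem.Str.len w + 1 + costOf ws := by
  simp [costOf]

-- A's position list, generalised over the starting line index
def posFrom (i : Int) : List (List (String × String)) → List (Int × Int)
  | [] => []
  | e :: t => (PySem.List.enumerate (lineWords e) 0).map (fun wi => (i, wi.1)) ++ posFrom (i + 1) t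

-- A's inner loop, closed form
theorem aInner_loop (li : Int) (ws : List String) (j : Int)
    (wl : List String) (pl cs : List (Int × Int)) (ci : Int) :
    (PySem.List.enumerate ws j).foldl (aInner li) (wl, pl, cs, ci)
      = (wl ++ ws, pl ++ (PySem.List.enumerate ws j).map (fun wi => (li, wi.1)),
         cs ++ spansFrom ci ws, ci + costOf ws) := by
  induction ws generalizing j wl pl cs ci with
  | nil => simp [PySem.List.enumerate_nil, spansFrom, costOf]
  | cons w ws ih =>
      simp only [PySem.List.enumerate_cons, List.foldl_cons, List.map_cons]
      rw [ih]
      simp [aInner, spansFrom, costOf_cons]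
      ring

theorem spansFrom_append (c : Int) (ws1 ws2 : List String) :
    spansFrom c (ws1 ++ ws2) = spansFrom c ws1 ++ spansFrom (c + costOf ws1) ws2 := by
  induction ws1 generalizing c with
  | nil => simp [spansFrom, costOf]
  | cons w ws ih => simp [spansFrom, ih, costOf_cons]; ring_nf

theorem costOf_append (ws1 ws2 : List String) :
    costOf (ws1 ++ ws2) = costOf ws1 + costOf ws2 := by
  simp [costOf]

-- A's outer loop, closed form
theorem aOuter_loop (t : List (List (String × String))) (i : Int)
    (wl : List String) (pl cs : List (Int × Int)) (ci : Int) :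
    (PySem.List.enumerate t i).foldl aOuter (wl, pl, cs, ci)
      = (wl ++ (t.map lineWords).flatten, pl ++ posFrom i t,
         cs ++ spansFrom ci (t.map lineWords).flatten, ci + costOf (t.map lineWords).flatten) := by
  induction t generalizing i wl pl cs ci with
  | nil => simp [PySem.List.enumerate_nil, posFrom, spansFrom, costOf]
  | cons e t ih =>
      simp only [PySem.List.enumerate_cons, List.foldl_cons, posFrom, List.map_cons, List.flatten_cons]
      rw [show aOuter (wl, pl, cs, ci) (i, e)
            = (PySem.List.enumerate (lineWords e) 0).foldl (aInner i) (wl, pl, cs, ci) from rfl]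
      rw [aInner_loop, ih]
      simp [spansFrom_append, costOf_append, List.append_assoc, add_assoc]

-- B's position pass equals A's, per line via map_fst_enumerate
theorem posB_eq (t : List (List (String × String))) (i : Int) :
    (PySem.List.enumerate (t.map lineWords) i).flatMap
      (fun le => (PySem.List.pyRange 0 (PySem.List.len le.2) 1).map (fun wi => (le.1, wi)))
      = posFrom i t := by
  induction t generalizing i with
  | nil => simp [PySem.List.enumerate_nil, posFrom]
  | cons e t ih =>
      simp only [List.map_cons, PySem.List.enumerate_cons, List.flatMap_cons, posFrom]
      rw [ih]
      congr 1
      have h := PySem.List.map_fst_enumerate (lineWords e) 0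
      calc (PySem.List.pyRange 0 (PySem.List.len (lineWords e)) 1).map (fun wi => (i, wi))
          = ((PySem.List.enumerate (lineWords e) 0).map (·.1)).map (fun wi => (i, wi)) := by
            rw [h]; simp [PySem.List.len_eq]
        _ = (PySem.List.enumerate (lineWords e) 0).map (fun wi => (i, wi.1)) := by
            simp [List.map_map, Function.comp]

-- every word produced by split() is nonempty and whitespace-free
theorem split₀_go_prop (cs : List Char) (cur : List Char) (acc : List (List Char))
    (hcur : ∀ c ∈ cur, PySem.Chars.isspace c = false)
    (hacc : ∀ w ∈ acc, w ≠ [] ∧ ∀ c ∈ w, PySem.Chars.isspace c = false) :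
    ∀ w ∈ PySem.Chars.split₀.go cs cur acc, w ≠ [] ∧ ∀ c ∈ w, PySem.Chars.isspace c = false := by
  induction cs generalizing cur acc with
  | nil =>
      intro w hw
      unfold PySem.Chars.split₀.go at hw
      by_cases h : cur.isEmpty
      · simp [h] at hw
        exact hacc w hw
      · simp [h] at hw
        rcases hw with hw | hw
        · exact hacc w hw
        · subst hw
          constructor
          · simp [List.isEmpty_iff] at h; simp [h]
          · intro c hc; exact hcur c (List.mem_reverse.mp hc)
  | cons c rest ih =>
      intro w hw
      unfold PySem.Chars.split₀.go at hw
      by_cases hs : PySem.Chars.isspace c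
      · simp only [hs, if_true] at hw
        by_cases he : cur.isEmpty
        · simp only [he, if_true] at hw
          exact ih [] acc (by simp) hacc w hw
        · simp only [he] at hw
          refine ih [] (cur.reverse :: acc) (by simp) ?_ w hw
          intro v hv
          rcases List.mem_cons.mp hv with rfl | hv'
          · constructor
            · simp [List.isEmpty_iff] at he; simp [he]
            · intro d hd; exact hcur d (List.mem_reverse.mp hd)
          · exact hacc v hv'
      · simp only [hs] at hw
        refine ih (c :: cur) acc ?_ hacc w hw
        intro d hd
        rcases List.mem_cons.mp hd with rfl | hd'
        · simpa using hs
        · exact hcur d hd'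

theorem split₀_words (s : String) :
    ∀ w ∈ PySem.Str.split₀ s, w.toList ≠ [] ∧ ∀ c ∈ w.toList, c ≠ ' ' := by
  intro w hw
  simp only [PySem.Str.split₀, List.mem_map] at hw
  obtain ⟨l, hl, rfl⟩ := hw
  have h := split₀_go_prop s.toList [] [] (by simp) (by simp) l hl
  constructor
  · simpa using h.1
  · intro c hc hceq
    have := h.2 c (by simpa using hc)
    rw [hceq] at this
    exact absurd this (by decide)

-- B's scan loop as a structural recursion over the characters
def scanSp (acc : List (Int × Int)) (st : Option Int) (i : Int) : List Char → List (Int × Int) × Option Int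
  | [] => (acc, st)
  | c :: cs =>
      if c = ' ' then
        match st with
        | some s => scanSp (acc ++ [(s, i)]) none (i + 1) cs
        | none => scanSp acc none (i + 1) cs
      else
        match st with
        | some s => scanSp acc (some s) (i + 1) cs
        | none => scanSp acc (some i) (i + 1) cs

theorem foldl_bStep_eq_scanSp (cs : List Char) (i : Int) (acc : List (Int × Int)) (st : Option Int) :
    (PySem.List.enumerate cs i).foldl bStep (acc, st) = scanSp acc st i cs := by
  induction cs generalizing i acc st with
  | nil => simp [PySem.List.enumerate_nil, scanSp]
  | cons c cs ih =>
      simp only [PySem.List.enumerate_cons, List.foldl_cons, scanSp]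
      by_cases h : c = ' '
      · cases st <;> simp [bStep, h, ih]
      · cases st <;> simp [bStep, h, ih]

-- running through non-space characters keeps the open run
theorem scanSp_run (cs : List Char) (h : ∀ c ∈ cs, c ≠ ' ')
    (acc : List (Int × Int)) (s i : Int) (rest : List Char) :
    scanSp acc (some s) i (cs ++ rest) = scanSp acc (some s) (i + cs.length) rest := by
  induction cs generalizing i with
  | nil => simp
  | cons c cs ih =>
      have hc : c ≠ ' ' := h c (by simp)
      simp only [List.cons_append, scanSp, if_neg hc]
      rw [ih (fun d hd => h d (by simp [hd])) (i + 1)]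
      congr 1
      simp only [List.length_cons]
      push_cast
      ring

theorem scanSp_run_end (cs : List Char) (h : ∀ c ∈ cs, c ≠ ' ')
    (acc : List (Int × Int)) (s i : Int) :
    scanSp acc (some s) i cs = (acc, some s) := by
  have := scanSp_run cs h acc s i []
  simpa [scanSp] using this

-- flushing the final state with the end-of-text index
def flushAt (st : List (Int × Int) × Option Int) (e : Int) : List (Int × Int) :=
  match st.2 with
  | none => st.1
  | some s => st.1 ++ [(s, e)]

-- the main scan lemma: scanning the joined words recovers A's cursor spans
theorem scan_join (ws : List String)
    (hws : ∀ w ∈ ws, w.toList ≠ [] ∧ ∀ c ∈ w.toList, c ≠ ' ')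
    (acc : List (Int × Int)) (i : Int) :
    flushAt (scanSp acc none i (PySem.Chars.join [' '] (ws.map String.toList)))
        (i + (PySem.Chars.join [' '] (ws.map String.toList)).length)
      = acc ++ spansFrom i ws := by
  induction ws generalizing acc i with
  | nil => simp [PySem.Chars.join, List.intercalate, scanSp, flushAt, spansFrom]
  | cons w ws ih =>
      obtain ⟨hne, hnsp⟩ := hws w (by simp)
      obtain ⟨c, cs, hcs⟩ : ∃ c cs, w.toList = c :: cs := by
        cases h : w.toList with
        | nil => exact absurd h hne
        | cons a b => exact ⟨a, b, rfl⟩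
      have hc : c ≠ ' ' := hnsp c (by simp [hcs])
      have hcs' : ∀ d ∈ cs, d ≠ ' ' := fun d hd => hnsp d (by simp [hcs, hd])
      cases ws with
      | nil =>
          have hj : PySem.Chars.join [' '] ([w].map String.toList) = w.toList := by
            simp [PySem.Chars.join, List.intercalate]
          rw [hj, hcs]
          simp only [scanSp, if_neg hc]
          rw [scanSp_run_end cs hcs' acc i (i + 1)]
          simp [flushAt, spansFrom, PySem.Str.len_eq, hcs]
      | cons w2 ws2 =>
          have hjoin : PySem.Chars.join [' '] ((w :: w2 :: ws2).map String.toList)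
              = w.toList ++ ' ' :: PySem.Chars.join [' '] ((w2 :: ws2).map String.toList) := by
            simp [PySem.Chars.join, List.intercalate]
          rw [hjoin, hcs]
          simp only [List.cons_append, scanSp, if_neg hc]
          rw [scanSp_run cs hcs' acc i (i + 1) _]
          simp only [scanSp, if_true]
          have ihh := ih (fun v hv => hws v (by simp [hv]))
            (acc ++ [(i, i + 1 + cs.length)]) (i + 1 + cs.length + 1)
          have hE : i + ((c :: (cs ++ ' ' :: PySem.Chars.join [' '] ((w2 :: ws2).map String.toList))).length : Int)
              = (i + 1 + (cs.length : Int) + 1) + ((PySem.Chars.join [' '] ((w2 :: ws2).map String.toList)).length : Int) := by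
            push_cast [List.length_append, List.length_cons]
            ring
          rw [hE, ihh]
          have h1 : i + PySem.Str.len w = i + 1 + (cs.length : Int) := by
            simp only [PySem.Str.len_eq, hcs, List.length_cons]
            push_cast
            ring
          rw [show spansFrom i (w :: w2 :: ws2)
                = (i, i + PySem.Str.len w) :: spansFrom (i + PySem.Str.len w + 1) (w2 :: ws2) from rfl,
              h1]
          simp

-- B's result in closed form
theorem alt_closed (t : List (List (String × String))) :
    flatten_transcript_alt t
      = (PySem.Str.join " " (t.map lineWords).flatten, (t.map lineWords).flatten,
         posFrom 0 t, spansFrom 0 (t.map lineWords).flatten) := by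
  have hwl : (t.map lineWords).flatMap (fun ws => ws) = (t.map lineWords).flatten := by
    simp [List.flatMap_def, Function.comp_def]
  have hwords : ∀ w ∈ (t.map lineWords).flatten, w.toList ≠ [] ∧ ∀ c ∈ w.toList, c ≠ ' ' := by
    intro w hw
    rw [List.mem_flatten] at hw
    obtain ⟨ws, hws, hw⟩ := hw
    rw [List.mem_map] at hws
    obtain ⟨e, _, rfl⟩ := hws
    exact split₀_words _ w hw
  unfold flatten_transcript_alt
  simp only [hwl, posB_eq]
  have htext : (PySem.Str.join " " (t.map lineWords).flatten).toList
      = PySem.Chars.join [' '] ((t.map lineWords).flatten.map String.toList) := by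
    simp [PySem.Str.join]
  have hlen : PySem.Str.len (PySem.Str.join " " (t.map lineWords).flatten)
      = ((PySem.Chars.join [' '] ((t.map lineWords).flatten.map String.toList)).length : Int) := by
    simp [PySem.Str.len_eq, htext]
  rw [htext, foldl_bStep_eq_scanSp, hlen]
  have h := scan_join (t.map lineWords).flatten hwords [] 0
  simp only [zero_add, List.nil_append] at h
  simp only [flushAt] at h
  rw [h]

-- ===== VERDICT (by name: the statement is the Claim_ definition above) =====
theorem flatten_transcript_spec : Claim_equal_flatten_transcript := by
  intro t _ _
  unfold Spec_flatten_transcript flatten_transcript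
  rw [alt_closed, aOuter_loop]
  simp
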